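-- pv_equiv track=rewrite | github.com/AnoirELGUEDDAR/pfs-project | gui/files_tab.py | _sanitize_windows_path
-- ===== SOURCE A (Python) =====
-- def _sanitize_windows_path(path):
--     """Make sure Windows paths are formatted correctly"""
--     if not path:
--         return path
--
--     # Handle drive letters properly
--     if len(path) >= 2 and path[1] == ':':
--         drive_letter = path[0].upper()
--         # Ensure proper drive letter format
--         path = f"{drive_letter}:" + path[2:]
--
--     # Replace any forward slashes with backslashes
--     path = path.replace("/", "\\")
--
--     # Remove any double backslashes (except for UNC paths)
--     if not path.startswith("\\\\"):
--         while "\\\\" in path: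
--             path = path.replace("\\\\", "\\")
--
--     return path
-- ===== SOURCE B (Python) =====
-- def _sanitize_windows_path(path):
--     """Make sure Windows paths are formatted correctly"""
--     if not path:
--         return path
--
--     # Drive letter: uppercase and keep the colon
--     if len(path) >= 2 and path[1] == ':':
--         path = path[0].upper() + ':' + path[2:]
--
--     # Forward slashes become backslashes
--     path = path.replace("/", "\\")
--
--     # UNC paths are returned as-is
--     if path.startswith("\\\\"):
--         return path
--
--     # Single forward pass: drop a backslash that follows an emitted backslash
--     out = []
--     prev = None
--     for ch in path:
--         if ch == '\\' and prev == '\\':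
--             continue
--         out.append(ch)
--         prev = ch
--     return ''.join(out)
-- ===== Notes on version B (the rewrite author's own statement) =====
-- stated objective: simpler
-- what changed: A collapses repeated backslashes by calling whole-string replace in a while loop until no double backslash remains; B does it in one forward pass over the characters, skipping a backslash whose previously emitted character was also a backslash.
import Mathlib
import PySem

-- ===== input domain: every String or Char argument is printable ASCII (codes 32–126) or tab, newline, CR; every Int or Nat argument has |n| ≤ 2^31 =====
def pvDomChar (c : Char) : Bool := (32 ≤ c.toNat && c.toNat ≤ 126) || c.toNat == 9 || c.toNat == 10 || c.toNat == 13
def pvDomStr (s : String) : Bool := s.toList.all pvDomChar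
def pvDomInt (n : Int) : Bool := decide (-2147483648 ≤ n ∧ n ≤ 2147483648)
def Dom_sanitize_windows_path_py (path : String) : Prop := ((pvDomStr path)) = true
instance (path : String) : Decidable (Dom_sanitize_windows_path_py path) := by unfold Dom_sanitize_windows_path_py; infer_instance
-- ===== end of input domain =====

-- B collapses backslash runs in one forward character pass instead of A's repeated
-- whole-string replace loop; same value on every string input.


-- ===== PORT A =====
def pvDD : List Char := ['\\', '\\']

-- the two drive-letter/slash normalisation steps shared verbatim by A's and B's Python
def pvNormalize (cs : List Char) : List Char :=
  -- if len(path) >= 2 and path[1] == ':': path = path[0].upper() + ':' + path[2:]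
  let cs := match cs with
    | c0 :: c1 :: rest => if c1 = ':' then PySem.Chars.upperChar c0 :: ':' :: rest else c0 :: c1 :: rest
    | other => other
  -- path = path.replace("/", "\\")
  PySem.Chars.replace cs ['/'] ['\\']

-- what ONE pass of Python's path.replace("\\\\", "\\") computes (needed by the port for termination)
def pvRP : List Char → List Char
  | [] => []
  | [c] => [c]
  | c :: d :: t => if c = '\\' ∧ d = '\\' then '\\' :: pvRP t else c :: pvRP (d :: t)

theorem pvRP_len (l : List Char) : (pvRP l).length ≤ l.length := by
  induction l using pvRP.induct with
  | case1 => simp [pvRP]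
  | case2 c => simp [pvRP]
  | case3 c d t hcd ih => simp [pvRP, hcd] at ih ⊢; omega
  | case4 c d t hcd ih => simp [pvRP, hcd] at ih ⊢; omega

theorem pvGo_eq (fuel : Nat) (l acc : List Char) (h : l.length ≤ fuel) :
    PySem.Chars.replace.go pvDD ['\\'] fuel l acc = acc.reverse ++ pvRP l := by
  induction fuel generalizing l acc with
  | zero =>
    have : l = [] := by cases l <;> simp_all
    subst this; simp [PySem.Chars.replace.go, pvRP]
  | succ fuel ih =>
    match l, h with
    | [], _ => simp [PySem.Chars.replace.go, pvRP]
    | [c], _ =>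
      have hp : pvDD.isPrefixOf [c] = false := by simp [pvDD, List.isPrefixOf]
      simp only [PySem.Chars.replace.go, hp, Bool.false_eq_true, if_false]
      rw [ih [] (c :: acc) (by simp)]
      simp [pvRP]
    | c :: d :: t', h =>
      by_cases hcd : c = '\\' ∧ d = '\\'
      · obtain ⟨rfl, rfl⟩ := hcd
        have hp : pvDD.isPrefixOf ('\\' :: '\\' :: t') = true := by
          simp [pvDD, List.isPrefixOf]
        simp only [PySem.Chars.replace.go, hp, if_true]
        rw [show List.drop pvDD.length ('\\' :: '\\' :: t') = t' from by simp [pvDD]]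
        rw [ih t' _ (by simp at h ⊢; omega)]
        simp [pvRP]
      · have hp : pvDD.isPrefixOf (c :: d :: t') = false := by
          simp only [pvDD, List.isPrefixOf, Bool.and_eq_false_iff]
          rcases not_and_or.mp hcd with hc | hd
          · exact Or.inl (by simp [beq_eq_false_iff_ne]; exact fun e => hc e.symm)
          · exact Or.inr (Or.inl (by simp [beq_eq_false_iff_ne]; exact fun e => hd e.symm))
        simp only [PySem.Chars.replace.go, hp, Bool.false_eq_true, if_false]
        rw [ih (d :: t') (c :: acc) (by simp at h ⊢; omega)]
        simp [pvRP, hcd]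

theorem pvReplace_eq (l : List Char) :
    PySem.Chars.replace l pvDD ['\\'] = pvRP l := by
  have := pvGo_eq l.length l [] le_rfl
  simpa [PySem.Chars.replace, pvDD] using this

theorem pvRP_len_lt (l : List Char) (h : PySem.Chars.isIn pvDD l = true) :
    (pvRP l).length < l.length := by
  rw [PySem.Chars.isIn_iff_infix] at h
  induction l using pvRP.induct with
  | case1 => have := h.sublist.length_le; simp [pvDD] at this
  | case2 c => have := h.sublist.length_le; simp [pvDD] at this
  | case3 c d t hcd ih =>
    have := pvRP_len t
    simp [pvRP, hcd]; omega
  | case4 c d t hcd ih =>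
    rcases List.infix_cons_iff.mp h with hpre | hinf
    · exfalso
      have h1 : c = '\\' ∧ d = '\\' := by
        rcases hpre with ⟨r, hr⟩
        simp [pvDD] at hr
        exact ⟨hr.1.symm, hr.2.1.symm⟩
      exact hcd h1
    · have := ih hinf
      simp [pvRP, hcd] at this ⊢; omega

def pvLoopA (cs : List Char) : List Char :=
  -- while "\\\\" in path: path = path.replace("\\\\", "\\")
  if h : PySem.Chars.isIn pvDD cs then pvLoopA (PySem.Chars.replace cs pvDD ['\\']) else cs
termination_by cs.length
decreasing_by rw [pvReplace_eq]; exact pvRP_len_lt cs h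

def sanitize_windows_path_py (path : String) : String :=
  if path = "" then path
  else
    let cs := pvNormalize path.toList
    -- if not path.startswith("\\\\"): while "\\\\" in path: ...
    if ¬ PySem.Chars.startswith cs pvDD then String.mk (pvLoopA cs) else String.mk cs

-- ===== PORT B =====
def sanitize_windows_path_py_alt (path : String) : String :=
  if path = "" then path
  else
    let cs := pvNormalize path.toList
    if PySem.Chars.startswith cs pvDD then String.mk cs
    else
      -- out = []; prev = None; for ch in path: skip ch if ch == '\\' and prev == '\\'
      let st := cs.foldl
        (fun (st : List Char × Option Char) ch =>
          if ch = '\\' ∧ st.2 = some '\\' then st else (st.1 ++ [ch], some ch))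
        ([], none)
      String.mk st.1

-- ===== PRECONDITION & SPEC =====
def Spec_sanitize_windows_path_py (path : String) (out : String) : Prop := out = sanitize_windows_path_py_alt path
instance (path : String) (out : String) : Decidable (Spec_sanitize_windows_path_py path out) := by unfold Spec_sanitize_windows_path_py; infer_instance

-- ===== CLAIM (what is proved, stated in full; the proofs are below) =====
def Claim_equal_sanitize_windows_path_py : Prop := ∀ (path : String), Dom_sanitize_windows_path_py path → Spec_sanitize_windows_path_py path (sanitize_windows_path_py path)

-- ===== LEMMAS AND PROOFS =====
-- the collapsing pass of B, as a structural recursion over (previously emitted char, rest)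
def pvCol (prev : Option Char) : List Char → List Char
  | [] => []
  | c :: t => if c = '\\' ∧ prev = some '\\' then pvCol prev t else c :: pvCol (some c) t

theorem pvFold_eq (t : List Char) (out : List Char) (prev : Option Char) :
    (t.foldl (fun (st : List Char × Option Char) ch =>
        if ch = '\\' ∧ st.2 = some '\\' then st else (st.1 ++ [ch], some ch))
      (out, prev)).1 = out ++ pvCol prev t := by
  induction t generalizing out prev with
  | nil => simp [pvCol]
  | cons c t ih =>
    by_cases h : c = '\\' ∧ prev = some '\\'
    · simp [List.foldl_cons, h, pvCol, ih]
    · simp [List.foldl_cons, h, pvCol, ih]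

theorem pvCol_rp (l : List Char) : ∀ prev, pvCol prev (pvRP l) = pvCol prev l := by
  induction l using pvRP.induct with
  | case1 => intro prev; simp [pvRP]
  | case2 c => intro prev; simp [pvRP]
  | case3 c d t hcd ih =>
    intro prev
    obtain ⟨rfl, rfl⟩ := hcd
    by_cases hp : prev = some '\\'
    · simp [pvRP, pvCol, hp, ih (some '\\')]
    · simp [pvRP, pvCol, hp, ih (some '\\')]
  | case4 c d t hcd ih =>
    intro prev
    by_cases hc : c = '\\' ∧ prev = some '\\'
    · obtain ⟨rfl, hp⟩ := hc
      have hd : ¬ d = '\\' := fun hd => hcd ⟨rfl, hd⟩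
      simp [pvRP, hd, pvCol, hp, ih (some '\\')]
    · simp [pvRP, hcd, pvCol, hc, ih (some c)]

theorem pvCol_id (l : List Char) : ∀ prev, ¬ (pvDD <:+: l) →
    (prev = some '\\' → l.head? ≠ some '\\') → pvCol prev l = l := by
  induction l with
  | nil => intro prev _ _; simp [pvCol]
  | cons c t ih =>
    intro prev hinf hh
    have hc : ¬ (c = '\\' ∧ prev = some '\\') := by
      rintro ⟨rfl, hp⟩; exact hh hp (by simp)
    have htinf : ¬ (pvDD <:+: t) := fun h => hinf (h.trans (List.suffix_cons c t).isInfix)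
    have hh' : some c = some '\\' → t.head? ≠ some '\\' := by
      rintro hc' ht
      apply hinf
      cases t with
      | nil => simp at ht
      | cons e t' =>
        simp at ht hc'
        exact ((List.prefix_cons_iff ..).mpr (by simp [pvDD, hc', ht]) : pvDD <+: c :: e :: t').isInfix
    simp [pvCol, hc, ih (some c) htinf hh']

theorem pvLoopA_eq (cs : List Char) : pvLoopA cs = pvCol none cs := by
  induction cs using pvLoopA.induct with
  | case1 cs h ih =>
    rw [pvLoopA, dif_pos h, ih, pvReplace_eq, pvCol_rp]
  | case2 cs h =>
    rw [pvLoopA, dif_neg h]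
    exact (pvCol_id cs none (by
      have := (Bool.not_eq_true _).mp h
      exact (PySem.Chars.isIn_eq_false_iff ..).mp this) (by simp)).symm

-- ===== VERDICT (by name: the statement is the Claim_ definition above) =====
theorem sanitize_windows_path_py_spec : Claim_equal_sanitize_windows_path_py := by
  intro path _
  unfold Spec_sanitize_windows_path_py sanitize_windows_path_py sanitize_windows_path_py_alt
  by_cases h0 : path = ""
  · simp [h0]
  · simp only [h0, if_false]
    by_cases hsw : PySem.Chars.startswith (pvNormalize path.toList) pvDD
    · simp [hsw]
    · simp only [hsw, Bool.false_eq_true, not_false_iff, if_true, if_false]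
      rw [pvFold_eq, pvLoopA_eq]
      simp
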